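-- pv_equiv track=rewrite | github.com/nitin35byte/new_prython_practise_repo | Important Coding Questions/longest commons subsequencies(LCS).py | first_negative_in_window
-- ===== SOURCE A (Python) =====
-- def first_negative_in_window(arr, n):
--     result = []
--
--     for i in range(len(arr)-n+1):
--         window=arr[i:i+n]
--
--         for num in window:
--             if num > 0:
--                 result.append(num)
--                 found=True
--                 break
--         if not found:
--             result.append(0)
--
--     return result
-- ===== SOURCE B (Python) =====
-- def first_negative_in_window(arr, n):
--     # Single left-to-right pass: j is the index of the first positive element
--     # at or after the current window start, so each cell is inspected once.
--     result = []
--     j = 0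
--     for i in range(len(arr) - n + 1):
--         if j < i:
--             j = i
--         while j < i + n and arr[j] <= 0:
--             j += 1
--         result.append(arr[j] if j < i + n else 0)
--     return result
-- ===== Notes on version B (the rewrite author's own statement) =====
-- stated objective: faster
-- what changed: single left-to-right pass keeping a persistent pointer to the next positive element (each cell inspected at most once) instead of rescanning every length-n window from scratch; Pre_ excludes n <= 0 (a non-positive window size is outside the natural domain: A's negative-n slices wrap around and it raises UnboundLocalError whenever such a window is empty or all-nonpositive) and inputs whose first window has no positive element, on which A raises UnboundLocalError (unbound 'found').
-- intended difference: On inputs where some full window after the first contains no positive element, A appends nothing for that window (its 'found' flag is never reset after the first window), while B appends the conventional placeholder 0, which is the intended per-window output. — e.g. on first_negative_in_window([1, -1], 1): A returns [1], B returns [1, 0]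
-- outside the precondition, e.g. on first_negative_in_window([-1, 2], 1): A raises UnboundLocalError, B returns [0, 2]; on first_negative_in_window([2, -1, -2, -1], -2): A returns [2], B returns [0, 0, 0, 0, 0, 0, 0]
import Mathlib
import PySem

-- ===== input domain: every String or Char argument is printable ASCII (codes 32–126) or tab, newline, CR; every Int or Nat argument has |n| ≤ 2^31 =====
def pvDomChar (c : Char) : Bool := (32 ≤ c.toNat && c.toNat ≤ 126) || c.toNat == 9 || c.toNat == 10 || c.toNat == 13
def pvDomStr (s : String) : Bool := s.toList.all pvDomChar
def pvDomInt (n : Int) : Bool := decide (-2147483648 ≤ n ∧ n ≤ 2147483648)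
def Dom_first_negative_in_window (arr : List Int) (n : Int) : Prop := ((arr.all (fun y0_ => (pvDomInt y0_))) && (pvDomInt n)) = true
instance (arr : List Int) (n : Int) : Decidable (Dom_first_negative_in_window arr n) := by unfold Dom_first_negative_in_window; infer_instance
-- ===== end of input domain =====

-- B replaces A's per-window rescan by a single pass with a persistent pointer
-- to the next positive element (asymptotically faster); on windows with no
-- positive element B appends 0 where A appends nothing (see D_ below).

-- ===== PORT A =====
-- one iteration of A's outer for-loop; the inner for-with-break is find?.
-- The none-branch with st.2 = false corresponds to Python's NameError on the
-- unbound 'found' (A raises there; such inputs are outside Pre_): we append 0.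
def fnwA_step (arr : List Int) (n : Int) (st : List Int × Bool) (i : Int) : List Int × Bool :=
  let window := PySem.List.slice arr (some i) (some (i + n))
  match window.find? (fun num => decide (0 < num)) with
  | some num => (st.1 ++ [num], true)
  | none => if st.2 = false then (st.1 ++ [0], st.2) else st

def first_negative_in_window (arr : List Int) (n : Int) : List Int :=
  ((PySem.List.pyRange 0 ((arr.length : Int) - n + 1) 1).foldl (fnwA_step arr n) ([], false)).1

-- ===== PORT B =====
-- B's inner while-loop: advance j while j < stop and arr[j] <= 0.
-- pyGetD's default 1 is never used: every call has 0 ≤ j < arr.length (exact).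
def fnwB_advF (arr : List Int) (stop : Int) : Int → Nat → Int
  | j, 0 => j
  | j, f + 1 =>
    if j < stop ∧ PySem.List.pyGetD arr j 1 ≤ 0 then fnwB_advF arr stop (j + 1) f else j

def fnwB_adv (arr : List Int) (stop : Int) (j : Int) : Int :=
  fnwB_advF arr stop j (stop - j).toNat

def fnwB_step (arr : List Int) (n : Int) (st : List Int × Int) (i : Int) : List Int × Int :=
  let j0 := if st.2 < i then i else st.2
  let j := fnwB_adv arr (i + n) j0
  (st.1 ++ [if j < i + n then PySem.List.pyGetD arr j 0 else 0], j)

def first_negative_in_window_alt (arr : List Int) (n : Int) : List Int :=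
  ((PySem.List.pyRange 0 ((arr.length : Int) - n + 1) 1).foldl (fnwB_step arr n) ([], 0)).1

-- ===== PRECONDITION & SPEC =====
-- Pre_ excludes n ≤ 0 — a non-positive window size is outside the natural
-- domain: A's negative-n slices wrap around, and A raises UnboundLocalError
-- whenever such a window is empty or all-nonpositive — and the inputs whose
-- first window arr[0:n] has no positive element, on which A raises
-- UnboundLocalError from the unbound 'found'.
def Pre_first_negative_in_window (arr : List Int) (n : Int) : Prop :=
  0 < n ∧ ((arr.length : Int) < n ∨ ∃ x ∈ arr.take n.toNat, 0 < x)
instance (arr : List Int) (n : Int) : Decidable (Pre_first_negative_in_window arr n) := by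
  unfold Pre_first_negative_in_window; infer_instance

def pvWitness_first_negative_in_window : List Int × Int := ([1, 2], 1)


-- On inputs where some full window after the first contains no positive
-- element, A appends nothing for that window (its 'found' flag is never reset
-- after the first window), while B appends the conventional placeholder 0,
-- which is the intended per-window output.
def D_first_negative_in_window (arr : List Int) (n : Int) : Prop :=
  0 < n ∧ n ≤ (arr.length : Int) ∧
    ∃ i < arr.length + 1, i + n.toNat ≤ arr.length ∧
      (((arr.drop i).take n.toNat).all (fun x => decide (x ≤ 0))) = true
instance (arr : List Int) (n : Int) : Decidable (D_first_negative_in_window arr n) := by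
  unfold D_first_negative_in_window; infer_instance

def Spec_first_negative_in_window (arr : List Int) (n : Int) (out : List Int) : Prop :=
  ¬ D_first_negative_in_window arr n → out = first_negative_in_window_alt arr n
instance (arr : List Int) (n : Int) (out : List Int) : Decidable (Spec_first_negative_in_window arr n out) := by
  unfold Spec_first_negative_in_window; infer_instance

def pvDiffWitness_first_negative_in_window : List Int × Int := ([1, -1], 1)
def pvDiffWitnessOut_first_negative_in_window : (List Int) × (List Int) := ([1], [1, 0])

-- ===== CLAIM (what is proved, stated in full; the proofs are below) =====
def Claim_unchanged_first_negative_in_window : Prop := ∀ (arr : List Int) (n : Int), Dom_first_negative_in_window arr n → Pre_first_negative_in_window arr n → Spec_first_negative_in_window arr n (first_negative_in_window arr n)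
def Claim_changed_first_negative_in_window : Prop := Dom_first_negative_in_window (pvDiffWitness_first_negative_in_window.1) (pvDiffWitness_first_negative_in_window.2) ∧ Pre_first_negative_in_window (pvDiffWitness_first_negative_in_window.1) (pvDiffWitness_first_negative_in_window.2) ∧ D_first_negative_in_window (pvDiffWitness_first_negative_in_window.1) (pvDiffWitness_first_negative_in_window.2) ∧ first_negative_in_window (pvDiffWitness_first_negative_in_window.1) (pvDiffWitness_first_negative_in_window.2) = pvDiffWitnessOut_first_negative_in_window.1 ∧ first_negative_in_window_alt (pvDiffWitness_first_negative_in_window.1) (pvDiffWitness_first_negative_in_window.2) = pvDiffWitnessOut_first_negative_in_window.2 ∧ pvDiffWitnessOut_first_negative_in_window.1 ≠ pvDiffWitnessOut_first_negative_in_window.2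
def Claim_exact_first_negative_in_window : Prop := ∀ (arr : List Int) (n : Int), Dom_first_negative_in_window arr n → Pre_first_negative_in_window arr n → D_first_negative_in_window arr n → first_negative_in_window arr n ≠ first_negative_in_window_alt arr n

-- ===== LEMMAS AND PROOFS =====

theorem fnwB_adv_eq (arr : List Int) (stop j : Int) :
    fnwB_adv arr stop j =
      if j < stop ∧ PySem.List.pyGetD arr j 1 ≤ 0 then fnwB_adv arr stop (j + 1) else j := by
  unfold fnwB_adv
  by_cases hj : j < stop
  · have hf : (stop - j).toNat = (stop - (j + 1)).toNat + 1 := by omega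
    rw [hf]
    simp only [fnwB_advF]
  · have hf : (stop - j).toNat = 0 := by omega
    rw [hf]
    simp only [fnwB_advF]
    rw [if_neg]
    rintro ⟨h, -⟩
    exact hj h

theorem getD_drop_take (arr : List Int) (i nn k : Nat) (hk : k < nn) :
    ((arr.drop i).take nn).getD k 0 = arr.getD (i + k) 0 := by
  simp [List.getD_eq_getElem?_getD, List.getElem?_take_of_lt hk, List.getElem?_drop]

theorem exists_first (l : List Int) (h : ∃ x ∈ l, 0 < x) :
    ∃ e, e < l.length ∧ 0 < l.getD e 0 ∧ ∀ k, k < e → ¬ 0 < l.getD k 0 := by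
  induction l with
  | nil => simp at h
  | cons x xs ih =>
    by_cases hx : 0 < x
    · exact ⟨0, by simp, by simpa using hx, fun k hk => absurd hk (by omega)⟩
    · obtain ⟨x', hx', hposx'⟩ := h
      rcases List.mem_cons.mp hx' with rfl | hmem
      · exact absurd hposx' hx
      · obtain ⟨e, he, hpe, hmin⟩ := ih ⟨x', hmem, hposx'⟩
        refine ⟨e + 1, by simpa using he, by simpa using hpe, ?_⟩
        intro k hk
        cases k with
        | zero => simpa using hx
        | succ k' => simpa using hmin k' (by omega)

theorem find?_eq_getD (l : List Int) (e : Nat) (he : e < l.length) (h2 : 0 < l.getD e 0)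
    (h1 : ∀ k, k < e → ¬ 0 < l.getD k 0) :
    l.find? (fun num => decide (0 < num)) = some (l.getD e 0) := by
  induction l generalizing e with
  | nil => simp at he
  | cons x xs ih =>
    by_cases hx : 0 < x
    · have he0 : e = 0 := by
        by_contra hne
        exact h1 0 (by omega) (by simpa using hx)
      subst he0
      simp [List.find?_cons_of_pos, hx]
    · have he0 : e ≠ 0 := by
        rintro rfl
        exact hx (by simpa using h2)
      obtain ⟨e', rfl⟩ := Nat.exists_eq_succ_of_ne_zero he0
      rw [List.find?_cons_of_neg (by simpa using hx)]
      simpa using ih e' (by simpa using he) (by simpa using h2)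
        (fun k hk => by simpa using h1 (k + 1) (by omega))

theorem adv_eq_aux (arr : List Int) (stop e : Int) (hes : e < stop)
    (hpos : 0 < PySem.List.pyGetD arr e 1) :
    ∀ f : Nat, ∀ j : Int, (e - j).toNat = f → j ≤ e →
      (∀ k : Int, j ≤ k → k < e → PySem.List.pyGetD arr k 1 ≤ 0) →
      fnwB_adv arr stop j = e := by
  intro f
  induction f with
  | zero =>
    intro j hf hje _
    have hj : j = e := by omega
    subst hj
    rw [fnwB_adv_eq, if_neg]
    rintro ⟨-, hle⟩
    omega
  | succ f ih =>
    intro j hf hje hpre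
    have hjlt : j < e := by omega
    rw [fnwB_adv_eq, if_pos ⟨by omega, hpre j le_rfl hjlt⟩]
    exact ih (j + 1) (by omega) (by omega) (fun k hk1 hk2 => hpre k (by omega) hk2)

theorem getD_one_eq_getD_zero (arr : List Int) (e : Nat) (he : e < arr.length) :
    arr.getD e 1 = arr.getD e 0 := by
  rw [List.getD_eq_getElem arr 1 he, List.getD_eq_getElem arr 0 he]

theorem window_first (arr : List Int) (nn i : Nat)
    (h : ∃ x ∈ (arr.drop i).take nn, 0 < x) :
    ∃ e : Nat, i ≤ e ∧ e < i + nn ∧ e < arr.length ∧ 0 < arr.getD e 0 ∧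
      (∀ k : Nat, i ≤ k → k < e → arr.getD k 0 ≤ 0) ∧
      ((arr.drop i).take nn).find? (fun num => decide (0 < num)) = some (arr.getD e 0) := by
  obtain ⟨e', he', hpe, hmin⟩ := exists_first _ h
  have hlen : ((arr.drop i).take nn).length ≤ nn := by
    simp [List.length_take]
  have hlen2 : ((arr.drop i).take nn).length ≤ arr.length - i := by
    simp [List.length_take, List.length_drop]
  refine ⟨i + e', by omega, by omega, by omega, ?_, ?_, ?_⟩
  · rw [← getD_drop_take arr i nn e' (by omega)]
    exact hpe
  · intro k hk1 hk2
    have hk' := hmin (k - i) (by omega)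
    rw [getD_drop_take arr i nn (k - i) (by omega), Nat.add_sub_cancel' hk1] at hk'
    omega
  · have hfind := find?_eq_getD _ e' he' hpe hmin
    rwa [getD_drop_take arr i nn e' (by omega)] at hfind

theorem slice_window (arr : List Int) (i : Nat) (n : Int) (hn : 0 ≤ n) :
    PySem.List.slice arr (some (i : Int)) (some ((i : Int) + n)) = (arr.drop i).take n.toNat := by
  have hcast : (i : Int) + n = ((i : Int) + (n.toNat : Int)) := by omega
  rw [hcast, PySem.List.slice_natCast_add]

theorem loop_eq (arr : List Int) (n : Int) (hn : 0 < n) :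
    ∀ (c : Nat), ∀ (i : Nat) (resA resB : List Int) (bA : Bool) (j : Int),
      resA = resB → 0 ≤ j → j ≤ (i : Int) + n →
      (∀ k : Nat, i ≤ k → (k : Int) < j → arr.getD k 0 ≤ 0) →
      (i + c + n.toNat ≤ arr.length + 1) →
      (∀ m : Nat, i ≤ m → m + n.toNat ≤ arr.length → ∃ x ∈ (arr.drop m).take n.toNat, 0 < x) →
      ((PySem.List.pyRange (i : Int) ((i : Int) + (c : Int)) 1).foldl (fnwA_step arr n) (resA, bA)).1
        = ((PySem.List.pyRange (i : Int) ((i : Int) + (c : Int)) 1).foldl (fnwB_step arr n) (resB, j)).1 := by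
  intro c
  induction c with
  | zero =>
    intro i resA resB bA j hres _ _ _ _ _
    rw [PySem.List.pyRange_one_eq_nil (by omega)]
    simpa using hres
  | succ c ih =>
    intro i resA resB bA j hres hj0 hjub hinv hbound hall
    have hcons : PySem.List.pyRange (i : Int) ((i : Int) + ((c + 1 : Nat) : Int)) 1
        = (i : Int) :: PySem.List.pyRange ((i : Int) + 1) ((i : Int) + ((c + 1 : Nat) : Int)) 1 :=
      PySem.List.pyRange_one_cons (by push_cast; omega)
    have hwin : i + n.toNat ≤ arr.length := by omega
    have harg : (i : Int) + ((c + 1 : Nat) : Int) = ((i + 1 : Nat) : Int) + (c : Int) := by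
      push_cast; ring
    obtain ⟨e, hie, hew, hea, hpe, hmin, hfind⟩ :=
      window_first arr n.toNat i (hall i le_rfl hwin)
    have hAstep : fnwA_step arr n (resA, bA) (i : Int) = (resA ++ [arr.getD e 0], true) := by
      simp only [fnwA_step]
      rw [slice_window arr i n hn.le, hfind]
    have hBstep : fnwB_step arr n (resB, j) (i : Int) = (resB ++ [arr.getD e 0], (e : Int)) := by
      simp only [fnwB_step]
      set jc : Int := if j < (i : Int) then (i : Int) else j with hjc
      have hjcge : (i : Int) ≤ jc := by
        split at hjc <;> omega
      have hjce : jc ≤ (e : Int) := by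
        by_cases h : jc ≤ (e : Int)
        · exact h
        · exfalso
          have hje : (e : Int) < j := by
            by_cases hcase : j < (i : Int)
            · simp [hjc, if_pos hcase] at h; omega
            · simpa [hjc, if_neg hcase] using h
          have := hinv e hie hje
          omega
      have hadv : fnwB_adv arr ((i : Int) + n) jc = (e : Int) := by
        apply adv_eq_aux arr ((i : Int) + n) (e : Int) (by omega)
          (by rw [PySem.List.pyGetD_natCast, getD_one_eq_getD_zero arr e hea]; exact hpe)
          ((e : Int) - jc).toNat jc rfl hjce
        intro k hk1 hk2
        have hkn : k = ((k.toNat : Nat) : Int) := by omega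
        rw [hkn, PySem.List.pyGetD_natCast,
          getD_one_eq_getD_zero arr k.toNat (by omega)]
        exact hmin k.toNat (by omega) (by omega)
      rw [hadv, if_pos (by omega : (e : Int) < (i : Int) + n), PySem.List.pyGetD_natCast,
        List.getD_eq_getElem arr 0 hea]
    rw [hcons]
    simp only [List.foldl_cons]
    rw [hAstep, hBstep, harg]
    exact ih (i + 1) _ _ true (e : Int) (by rw [hres]) (by omega) (by push_cast; omega)
      (fun k hk1 hk2 => hmin k (by omega) (by omega)) (by omega)
      (fun m hm1 hm2 => hall m (by omega) hm2)

-- length of the B-fold: exactly one element appended per window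
theorem lenB (arr : List Int) (n : Int) :
    ∀ (l : List Int) (st : List Int × Int),
      ((l.foldl (fnwB_step arr n) st).1).length = st.1.length + l.length := by
  intro l
  induction l with
  | nil => intro st; simp
  | cons x xs ih =>
    intro st
    simp only [List.foldl_cons, ih, fnwB_step]
    simp
    omega

-- one A-step, by the outcome of find? on the window (flag already true)
theorem stepA_some (arr : List Int) (n : Int) (res : List Int) (b : Bool) (i v : Int)
    (hf : (PySem.List.slice arr (some i) (some (i + n))).find?
      (fun num => decide (0 < num)) = some v) :
    fnwA_step arr n (res, b) i = (res ++ [v], true) := by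
  simp only [fnwA_step, hf]

theorem stepA_none_true (arr : List Int) (n : Int) (res : List Int) (i : Int)
    (hf : (PySem.List.slice arr (some i) (some (i + n))).find?
      (fun num => decide (0 < num)) = none) :
    fnwA_step arr n (res, true) i = (res, true) := by
  simp only [fnwA_step, hf]
  simp

-- length of the A-fold from a true flag: at most one per window, strictly
-- fewer if some window in the range has no positive element
theorem lenA_le (arr : List Int) (n : Int) :
    ∀ (l : List Int) (res : List Int),
      ((l.foldl (fnwA_step arr n) (res, true)).1).length ≤ res.length + l.length := by
  intro l
  induction l with
  | nil => intro res; simp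
  | cons x xs ih =>
    intro res
    simp only [List.foldl_cons]
    cases hf : (PySem.List.slice arr (some x) (some (x + n))).find?
        (fun num => decide (0 < num)) with
    | some v =>
      rw [stepA_some arr n res true x v hf]
      have h1 := ih (res ++ [v])
      have h2 : (res ++ [v]).length = res.length + 1 := by simp
      simp only [List.length_cons]
      omega
    | none =>
      rw [stepA_none_true arr n res x hf]
      have h1 := ih res
      simp only [List.length_cons]
      omega

theorem lenA_lt (arr : List Int) (n : Int) :
    ∀ (l : List Int) (res : List Int) (m : Int), m ∈ l →
      (PySem.List.slice arr (some m) (some (m + n))).find? (fun num => decide (0 < num)) = none →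
      ((l.foldl (fnwA_step arr n) (res, true)).1).length < res.length + l.length := by
  intro l
  induction l with
  | nil => intro res m hm; simp at hm
  | cons x xs ih =>
    intro res m hm hnone
    simp only [List.foldl_cons]
    rcases List.mem_cons.mp hm with rfl | hmem
    · rw [stepA_none_true arr n res m hnone]
      have h1 := lenA_le arr n xs res
      simp only [List.length_cons]
      omega
    · cases hf : (PySem.List.slice arr (some x) (some (x + n))).find?
          (fun num => decide (0 < num)) with
      | some v =>
        rw [stepA_some arr n res true x v hf]
        have h1 := ih (res ++ [v]) m hmem hnone
        have h2 : (res ++ [v]).length = res.length + 1 := by simp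
        simp only [List.length_cons]
        omega
      | none =>
        rw [stepA_none_true arr n res x hf]
        have h1 := ih res m hmem hnone
        simp only [List.length_cons]
        omega

-- ===== VERDICT =====
theorem first_negative_in_window_spec : Claim_unchanged_first_negative_in_window := by
  intro arr n _ hpre
  unfold Spec_first_negative_in_window
  intro hnd
  unfold first_negative_in_window first_negative_in_window_alt
  by_cases ht : (arr.length : Int) - n + 1 ≤ 0
  · rw [PySem.List.pyRange_one_eq_nil (by omega)]
    simp
  · obtain ⟨hn, -⟩ := hpre
    have hnm : n ≤ (arr.length : Int) := by omega
    have hall : ∀ m : Nat, 0 ≤ m → m + n.toNat ≤ arr.length →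
        ∃ x ∈ (arr.drop m).take n.toNat, 0 < x := by
      intro m _ hm
      by_contra hno
      apply hnd
      refine ⟨hn, hnm, m, by omega, hm, ?_⟩
      rw [List.all_eq_true]
      intro x hx
      by_contra hxp
      exact hno ⟨x, hx, by simpa using hxp⟩
    have harg : (arr.length : Int) - n + 1 = ((0 : Nat) : Int) + ((arr.length - n.toNat + 1 : Nat) : Int) := by
      omega
    rw [show (0 : Int) = ((0 : Nat) : Int) by norm_num, harg]
    exact loop_eq arr n hn (arr.length - n.toNat + 1) 0 [] [] false 0 rfl le_rfl
      (by omega) (fun k hk1 hk2 => by omega) (by omega) hall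

theorem first_negative_in_window_changed : Claim_changed_first_negative_in_window := by
  unfold Claim_changed_first_negative_in_window; decide

theorem first_negative_in_window_tight : Claim_exact_first_negative_in_window := by
  intro arr n _ hpre hd heq
  obtain ⟨hn, hnm, i, -, hwin, hall⟩ := hd
  obtain ⟨-, hfirst⟩ := hpre
  -- the witness window has no positive element, so A's find? on it is none
  have hnone : (PySem.List.slice arr (some (i : Int)) (some ((i : Int) + n))).find?
      (fun num => decide (0 < num)) = none := by
    rw [slice_window arr i n hn.le, List.find?_eq_none]
    intro x hx
    rw [List.all_eq_true] at hall
    simpa using hall x hx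
  -- i = 0 would contradict Pre_ (the first window has a positive element)
  have hi0 : i ≠ 0 := by
    rintro rfl
    rcases hfirst with h | ⟨x, hx, hpx⟩
    · omega
    · rw [List.all_eq_true] at hall
      have hx0 : x ≤ 0 := by simpa using hall x (by simpa using hx)
      omega
  -- the first window has a positive element; its first one is arr.getD e 0
  have hfw : ∃ x ∈ (arr.drop 0).take n.toNat, 0 < x := by
    rcases hfirst with h | h
    · omega
    · simpa using h
  obtain ⟨e, -, -, hea, -, -, hfind⟩ := window_first arr n.toNat 0 hfw
  have hcons : PySem.List.pyRange 0 ((arr.length : Int) - n + 1) 1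
      = (0 : Int) :: PySem.List.pyRange (0 + 1) ((arr.length : Int) - n + 1) 1 :=
    PySem.List.pyRange_one_cons (by omega)
  have hwin' : (i : Int) + n ≤ (arr.length : Int) := by
    have h1 : ((i + n.toNat : Nat) : Int) ≤ ((arr.length : Nat) : Int) := by exact_mod_cast hwin
    push_cast at h1
    omega
  have hmem' : (i : Int) ∈ PySem.List.pyRange (0 + 1) ((arr.length : Int) - n + 1) 1 :=
    PySem.List.mem_pyRange_one.mpr ⟨by omega, by omega⟩
  -- B's result has one entry per window …
  have hB : (first_negative_in_window_alt arr n).length = ((arr.length : Int) - n + 1).toNat := by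
    unfold first_negative_in_window_alt
    rw [lenB arr n _ ([], 0), PySem.List.length_pyRange_one]
    simp
  -- … while A's has strictly fewer
  have hA : (first_negative_in_window arr n).length < ((arr.length : Int) - n + 1).toNat := by
    unfold first_negative_in_window
    rw [hcons]
    simp only [List.foldl_cons]
    have hs0 : PySem.List.slice arr (some (0 : Int)) (some ((0 : Int) + n))
        = (arr.drop 0).take n.toNat := by
      simpa using slice_window arr 0 n hn.le
    have hAstep : fnwA_step arr n (([], false) : List Int × Bool) 0 = ([arr.getD e 0], true) := by
      simp only [fnwA_step]
      rw [hs0, hfind]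
      rfl
    rw [hAstep]
    have h1 := lenA_lt arr n (PySem.List.pyRange (0 + 1) ((arr.length : Int) - n + 1) 1)
      [arr.getD e 0] (i : Int) hmem' hnone
    have h2 : (PySem.List.pyRange (0 + 1) ((arr.length : Int) - n + 1) 1).length
        = ((arr.length : Int) - n + 1 - (0 + 1)).toNat :=
      PySem.List.length_pyRange_one (0 + 1) ((arr.length : Int) - n + 1)
    simp only [List.length_singleton] at h1
    omega
  rw [heq] at hA
  omega
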